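-- pv_equiv track=rewrite | github.com/gwYun/2023-April-coding-study | sooyeon/09_stepping_stones.py | get_n_zero
-- ===== SOURCE A (Python) =====
-- def get_n_zero(arr, k, m):
--     cnt = 0
--     for e in arr:
--         if e <= m:
--             cnt += 1
--         else:
--             if cnt >= k:
--                 return cnt
--             cnt = 0
--     return cnt
-- ===== SOURCE B (Python) =====
-- def get_n_zero(arr, k, m):
--     # Two-staged: first collect the indices of all separators (elements > m),
--     # then compute each run length arithmetically as the gap between
--     # consecutive separator indices.
--     seps = [i for i, e in enumerate(arr) if e > m]
--     prev = -1
--     for s in seps: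
--         gap = s - prev - 1
--         if gap >= k:
--             return gap
--         prev = s
--     return len(arr) - prev - 1
-- ===== Notes on version B (the rewrite author's own statement) =====
-- stated objective: alternative
-- what changed: Replaces A's single scan with a running counter by a two-stage computation: first build the list of separator indices (elements > m), then derive each run length purely arithmetically as the gap between consecutive separator indices (and the tail gap to len(arr)).
import Mathlib
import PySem

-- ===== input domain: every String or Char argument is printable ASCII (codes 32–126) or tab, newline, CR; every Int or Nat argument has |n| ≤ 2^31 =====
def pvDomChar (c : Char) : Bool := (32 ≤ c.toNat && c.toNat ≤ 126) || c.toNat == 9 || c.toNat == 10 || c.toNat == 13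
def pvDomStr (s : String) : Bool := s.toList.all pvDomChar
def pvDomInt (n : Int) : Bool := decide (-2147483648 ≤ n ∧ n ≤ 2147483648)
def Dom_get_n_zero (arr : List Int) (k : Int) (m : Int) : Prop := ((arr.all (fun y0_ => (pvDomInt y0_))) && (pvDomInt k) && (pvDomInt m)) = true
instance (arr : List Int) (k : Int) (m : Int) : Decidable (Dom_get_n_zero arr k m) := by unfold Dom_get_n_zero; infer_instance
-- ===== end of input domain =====

-- B replaces A's running-counter scan by a two-stage computation: collect the
-- separator indices (elements > m) first, then derive run lengths as gaps
-- between consecutive separator indices; objective: alternative.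


-- ===== PORT A =====
-- 'for e in arr' with early return, transcribed as structural recursion on arr
def goA (k : Int) (m : Int) (cnt : Int) : List Int → Int
  | [] => cnt
  | e :: rest =>
    if e ≤ m then goA k m (cnt + 1) rest
    else if cnt ≥ k then cnt else goA k m 0 rest

def get_n_zero (arr : List Int) (k : Int) (m : Int) : Int := goA k m 0 arr

-- ===== PORT B =====
-- the comprehension [i for i, e in enumerate(arr) if e > m]
def sepsB (arr : List Int) (m : Int) : List Int :=
  (PySem.List.enumerate arr).filterMap (fun p => if p.2 > m then some p.1 else none)

-- 'for s in seps' with early return, transcribed as structural recursion on seps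
def goB (n : Int) (k : Int) (prev : Int) : List Int → Int
  | [] => n - prev - 1
  | s :: rest =>
    let gap := s - prev - 1
    if gap ≥ k then gap else goB n k s rest

def get_n_zero_alt (arr : List Int) (k : Int) (m : Int) : Int :=
  goB (arr.length : Int) k (-1) (sepsB arr m)

-- ===== PRECONDITION & SPEC =====
def Spec_get_n_zero (arr : List Int) (k : Int) (m : Int) (out : Int) : Prop := out = get_n_zero_alt arr k m
instance (arr : List Int) (k : Int) (m : Int) (out : Int) : Decidable (Spec_get_n_zero arr k m out) := by unfold Spec_get_n_zero; infer_instance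

-- ===== CLAIM =====
def Claim_equal_get_n_zero : Prop := ∀ (arr : List Int) (k : Int) (m : Int), Dom_get_n_zero arr k m → Spec_get_n_zero arr k m (get_n_zero arr k m)

-- ===== LEMMAS AND PROOFS =====

-- separators of the suffix starting at index i0, one unfolding step
theorem seps_cons (m i0 e : Int) (r : List Int) :
    (PySem.List.enumerate (e :: r) i0).filterMap (fun p => if p.2 > m then some p.1 else none)
      = (if e > m then [i0] else [])
        ++ (PySem.List.enumerate r (i0 + 1)).filterMap (fun p => if p.2 > m then some p.1 else none) := by
  by_cases h : e > m <;> simp [PySem.List.enumerate_cons, h]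

-- main invariant: A's scan of the suffix starting at index i0, with counter
-- cnt = i0 - prev - 1, equals B's gap loop over the suffix's separator indices
theorem main_inv (k m : Int) :
    ∀ (xs : List Int) (i0 prev cnt : Int), cnt = i0 - prev - 1 →
      goA k m cnt xs
        = goB (i0 + xs.length) k prev
            ((PySem.List.enumerate xs i0).filterMap (fun p => if p.2 > m then some p.1 else none)) := by
  intro xs
  induction xs with
  | nil =>
      intro i0 prev cnt hc
      simp [goA, goB, PySem.List.enumerate, hc]
  | cons e r ih =>
      intro i0 prev cnt hc
      rw [seps_cons]
      by_cases h : e ≤ m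
      · have hne : ¬ e > m := by omega
        simp only [hne, if_false, List.nil_append, goA, if_pos h]
        have := ih (i0 + 1) prev (cnt + 1) (by omega)
        rw [this]
        congr 1
        push_cast [List.length_cons]
        ring
      · have hgt : e > m := by omega
        simp only [hgt, if_true, List.singleton_append, goA, if_neg h, goB]
        have hcnt : i0 - prev - 1 = cnt := by omega
        rw [hcnt]
        by_cases hk : cnt ≥ k
        · simp [hk]
        · simp only [if_neg hk]
          have := ih (i0 + 1) i0 0 (by omega)
          rw [this]
          congr 1
          push_cast [List.length_cons]
          ring

-- ===== VERDICT =====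
theorem get_n_zero_spec : Claim_equal_get_n_zero := by
  intro arr k m _
  unfold Spec_get_n_zero get_n_zero get_n_zero_alt sepsB PySem.List.enumerate
  have := main_inv k m arr 0 (-1) 0 (by omega)
  unfold PySem.List.enumerate at this
  simpa using this
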